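-- pv_equiv track=rewrite | github.com/AdityaVG13/cortex | benchmarking/adapters/cortex_http_client.py | _relation_terms_conflict
-- ===== SOURCE A (Python) =====
-- _RELATION_CONFLICT_GROUPS = (
--     {"sister", "brother"},
--     {"mother", "father"},
--     {"son", "daughter"},
-- )
--
-- def _relation_terms_conflict(query_terms: set[str], text_terms: set[str]) -> bool:
--     if not query_terms or not text_terms:
--         return False
--     for group in _RELATION_CONFLICT_GROUPS:
--         query_group = query_terms & group
--         if not query_group:
--             continue
--         text_group = text_terms & group
--         if not text_group:
--             continue
--         if text_group - query_group:
--             return True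
--     return False
-- ===== SOURCE B (Python) =====
-- _RELATION_CONFLICT_GROUPS = (
--     {"sister", "brother"},
--     {"mother", "father"},
--     {"son", "daughter"},
-- )
--
-- # inverted index: each relation term -> its conflict group (built once)
-- _TERM_TO_GROUP = {term: group for group in _RELATION_CONFLICT_GROUPS for term in group}
--
-- def _relation_terms_conflict(query_terms: set[str], text_terms: set[str]) -> bool:
--     return any(
--         t in _TERM_TO_GROUP
--         and t not in query_terms
--         and not query_terms.isdisjoint(_TERM_TO_GROUP[t])
--         for t in text_terms
--     )
-- ===== Notes on version B (the rewrite author's own statement) =====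
-- stated objective: idiomatic
-- what changed: Replaces the per-group scan with set intersections/differences by a single any() over text_terms using a precomputed inverted index from relation term to its conflict group.
import Mathlib
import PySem

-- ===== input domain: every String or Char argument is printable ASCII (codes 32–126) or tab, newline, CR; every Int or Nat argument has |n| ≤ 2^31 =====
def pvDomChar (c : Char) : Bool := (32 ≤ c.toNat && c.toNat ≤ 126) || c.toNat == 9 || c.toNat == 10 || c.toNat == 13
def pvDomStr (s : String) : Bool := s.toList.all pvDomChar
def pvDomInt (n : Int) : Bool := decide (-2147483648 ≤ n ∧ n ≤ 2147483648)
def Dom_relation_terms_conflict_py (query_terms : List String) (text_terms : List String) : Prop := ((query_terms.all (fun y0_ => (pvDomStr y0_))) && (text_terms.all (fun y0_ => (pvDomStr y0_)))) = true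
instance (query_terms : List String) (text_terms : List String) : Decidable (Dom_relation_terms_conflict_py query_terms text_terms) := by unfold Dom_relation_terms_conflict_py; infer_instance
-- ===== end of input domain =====

-- B replaces A's per-group scan (intersections/differences) by a single any() over
-- text_terms using a precomputed inverted index term -> conflict group (idiomatic; same cost class).

-- ===== PORT A =====
-- _RELATION_CONFLICT_GROUPS (each set written as its distinct-element list)
def pvGroups : List (List String) :=
  [["sister", "brother"], ["mother", "father"], ["son", "daughter"]]

-- the 'for group in _RELATION_CONFLICT_GROUPS' loop with its early return
def pvConflictLoop (query_terms text_terms : List String) : List (List String) → Bool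
  | [] => false
  | group :: rest =>
    let query_group := PySem.Set.inter query_terms group
    if query_group.isEmpty then pvConflictLoop query_terms text_terms rest
    else
      let text_group := PySem.Set.inter text_terms group
      if text_group.isEmpty then pvConflictLoop query_terms text_terms rest
      else if !(PySem.Set.diff text_group query_group).isEmpty then true
      else pvConflictLoop query_terms text_terms rest

def relation_terms_conflict_py (query_terms : List String) (text_terms : List String) : Bool :=
  if query_terms.isEmpty || text_terms.isEmpty then false
  else pvConflictLoop query_terms text_terms pvGroups

-- ===== PORT B =====
-- _TERM_TO_GROUP = {term: group for group in _RELATION_CONFLICT_GROUPS for term in group}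
def pvTermToGroup : PySem.Dict String (List String) :=
  pvGroups.foldl (fun d group => group.foldl (fun d term => d.insert term group) d) PySem.Dict.empty

def relation_terms_conflict_py_alt (query_terms : List String) (text_terms : List String) : Bool :=
  text_terms.any (fun t =>
    match pvTermToGroup.get? t with
    | some group => !(query_terms.contains t) && !(PySem.Set.isdisjoint query_terms group)
    | none => false)

-- ===== PRECONDITION & SPEC =====
def Spec_relation_terms_conflict_py (query_terms : List String) (text_terms : List String) (out : Bool) : Prop := out = relation_terms_conflict_py_alt query_terms text_terms
instance (query_terms : List String) (text_terms : List String) (out : Bool) : Decidable (Spec_relation_terms_conflict_py query_terms text_terms out) := by unfold Spec_relation_terms_conflict_py; infer_instance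

-- ===== CLAIM (what is proved, stated in full; the proofs are below) =====
def Claim_equal_relation_terms_conflict_py : Prop := ∀ (query_terms : List String) (text_terms : List String), Dom_relation_terms_conflict_py query_terms text_terms → Spec_relation_terms_conflict_py query_terms text_terms (relation_terms_conflict_py query_terms text_terms)

-- ===== LEMMAS AND PROOFS =====

-- the common characterisation: some group meets the query, and some text term of that group is outside the query
def pvConf (q t g : List String) : Prop := (∃ y ∈ q, y ∈ g) ∧ ∃ x ∈ t, x ∈ g ∧ x ∉ q

lemma loop_iff (q t : List String) (gs : List (List String)) :
    pvConflictLoop q t gs = true ↔ ∃ g ∈ gs, pvConf q t g := by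
  induction gs with
  | nil => simp [pvConflictLoop]
  | cons g rest ih =>
    have hq : (PySem.Set.inter q g).isEmpty = true ↔ ¬ ∃ y ∈ q, y ∈ g := by
      simp [List.isEmpty_iff, List.eq_nil_iff_forall_not_mem, PySem.Set.mem_inter]
    have hd : (PySem.Set.diff (PySem.Set.inter t g) (PySem.Set.inter q g)).isEmpty = true ↔
        ¬ ∃ x ∈ t, x ∈ g ∧ x ∉ q := by
      simp only [List.isEmpty_iff, List.eq_nil_iff_forall_not_mem, PySem.Set.mem_diff,
        PySem.Set.mem_inter]
      constructor
      · rintro h ⟨x, hx, hxg, hxq⟩; exact h x ⟨⟨hx, hxg⟩, fun ⟨h1, _⟩ => hxq h1⟩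
      · rintro h x ⟨⟨hx, hxg⟩, hn⟩; exact h ⟨x, hx, hxg, fun hxq => hn ⟨hxq, hxg⟩⟩
    have ht : (PySem.Set.inter t g).isEmpty = true → ¬ ∃ x ∈ t, x ∈ g ∧ x ∉ q := by
      simp only [List.isEmpty_iff, List.eq_nil_iff_forall_not_mem, PySem.Set.mem_inter]
      rintro h ⟨x, hx, hxg, _⟩; exact h x ⟨hx, hxg⟩
    simp only [pvConflictLoop]
    split_ifs with h1 h2 h3
    · rw [ih]; simp [pvConf, hq.mp h1]
    · rw [ih]; have := ht h2; simp [pvConf, this]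
    · simp only [Bool.not_eq_true'] at h3
      have hdn : ¬ (PySem.Set.diff (PySem.Set.inter t g) (PySem.Set.inter q g)).isEmpty = true := by
        simp [h3]
      simp only [true_iff]
      refine ⟨g, List.mem_cons_self .., ?_, ?_⟩
      · by_contra hc; exact h1 (hq.mpr hc)
      · by_contra hc; exact hdn (hd.mpr hc)
    · rw [ih]
      have h3' : (PySem.Set.diff (PySem.Set.inter t g) (PySem.Set.inter q g)).isEmpty = true := by
        revert h3; cases (PySem.Set.diff (PySem.Set.inter t g) (PySem.Set.inter q g)).isEmpty <;> simp
      have := hd.mp h3'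
      simp [pvConf, this]

lemma a_iff (q t : List String) :
    relation_terms_conflict_py q t = true ↔ ∃ g ∈ pvGroups, pvConf q t g := by
  unfold relation_terms_conflict_py
  split_ifs with h
  · rcases Bool.or_eq_true_iff.mp h with h | h <;>
      · rw [List.isEmpty_iff] at h; subst h; simp [pvConf]
  · exact loop_iff q t pvGroups

lemma tg_get (x : String) : pvTermToGroup.get? x =
    if "sister" = x then some ["sister", "brother"]
    else if "brother" = x then some ["sister", "brother"]
    else if "mother" = x then some ["mother", "father"]
    else if "father" = x then some ["mother", "father"]
    else if "son" = x then some ["son", "daughter"]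
    else if "daughter" = x then some ["son", "daughter"]
    else none := by
  have : pvTermToGroup = PySem.Dict.mk
      [("sister", ["sister", "brother"]), ("brother", ["sister", "brother"]),
       ("mother", ["mother", "father"]), ("father", ["mother", "father"]),
       ("son", ["son", "daughter"]), ("daughter", ["son", "daughter"])] := by decide
  rw [this]
  split_ifs with h1 h2 h3 h4 h5 h6
  · subst h1; decide
  · subst h2; decide
  · subst h3; decide
  · subst h4; decide
  · subst h5; decide
  · subst h6; decide
  · have b1 : ("sister" == x) = false := by simp [h1]
    have b2 : ("brother" == x) = false := by simp [h2]
    have b3 : ("mother" == x) = false := by simp [h3]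
    have b4 : ("father" == x) = false := by simp [h4]
    have b5 : ("son" == x) = false := by simp [h5]
    have b6 : ("daughter" == x) = false := by simp [h6]
    simp [PySem.Dict.get?, b1, b2, b3, b4, b5, b6]

lemma b_iff (q t : List String) :
    relation_terms_conflict_py_alt q t = true ↔
      ∃ x ∈ t, x ∉ q ∧ ∃ g ∈ pvGroups, x ∈ g ∧ ∃ y ∈ q, y ∈ g := by
  unfold relation_terms_conflict_py_alt
  rw [List.any_eq_true]
  apply exists_congr; intro x
  apply and_congr_right; intro hx
  rw [tg_get]
  have hdis : ∀ g : List String,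
      ((!(q.contains x) && !(PySem.Set.isdisjoint q g)) = true) ↔
        (x ∉ q ∧ ∃ y ∈ q, y ∈ g) := by
    intro g
    simp [PySem.Set.isdisjoint, List.any_eq_true]
  split_ifs with e1 e2 e3 e4 e5 e6
  · subst e1; rw [show (match some ["sister", "brother"] with
      | some group => !(q.contains "sister") && !(PySem.Set.isdisjoint q group)
      | none => false) = (!(q.contains "sister") && !(PySem.Set.isdisjoint q ["sister", "brother"])) from rfl,
      hdis]; simp [pvGroups]
  · subst e2; rw [show (match some ["sister", "brother"] with
      | some group => !(q.contains "brother") && !(PySem.Set.isdisjoint q group)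
      | none => false) = (!(q.contains "brother") && !(PySem.Set.isdisjoint q ["sister", "brother"])) from rfl,
      hdis]; simp [pvGroups]
  · subst e3; rw [show (match some ["mother", "father"] with
      | some group => !(q.contains "mother") && !(PySem.Set.isdisjoint q group)
      | none => false) = (!(q.contains "mother") && !(PySem.Set.isdisjoint q ["mother", "father"])) from rfl,
      hdis]; simp [pvGroups]
  · subst e4; rw [show (match some ["mother", "father"] with
      | some group => !(q.contains "father") && !(PySem.Set.isdisjoint q group)
      | none => false) = (!(q.contains "father") && !(PySem.Set.isdisjoint q ["mother", "father"])) from rfl,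
      hdis]; simp [pvGroups]
  · subst e5; rw [show (match some ["son", "daughter"] with
      | some group => !(q.contains "son") && !(PySem.Set.isdisjoint q group)
      | none => false) = (!(q.contains "son") && !(PySem.Set.isdisjoint q ["son", "daughter"])) from rfl,
      hdis]; simp [pvGroups]
  · subst e6; rw [show (match some ["son", "daughter"] with
      | some group => !(q.contains "daughter") && !(PySem.Set.isdisjoint q group)
      | none => false) = (!(q.contains "daughter") && !(PySem.Set.isdisjoint q ["son", "daughter"])) from rfl,
      hdis]; simp [pvGroups]
  · simp only [false_iff]
    rintro ⟨h1, g, hg, hxg, -⟩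
    simp only [pvGroups, List.mem_cons, List.not_mem_nil, or_false] at hg
    rcases hg with rfl | rfl | rfl <;>
      · simp only [List.mem_cons, List.not_mem_nil, or_false] at hxg
        rcases hxg with rfl | rfl <;> simp_all

-- the two existential shapes coincide (just a reordering of the quantifiers)
lemma shapes (q t : List String) :
    (∃ g ∈ pvGroups, pvConf q t g) ↔
      ∃ x ∈ t, x ∉ q ∧ ∃ g ∈ pvGroups, x ∈ g ∧ ∃ y ∈ q, y ∈ g := by
  constructor
  · rintro ⟨g, hg, ⟨y, hy, hyg⟩, x, hx, hxg, hxq⟩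
    exact ⟨x, hx, hxq, g, hg, hxg, y, hy, hyg⟩
  · rintro ⟨x, hx, hxq, g, hg, hxg, y, hy, hyg⟩
    exact ⟨g, hg, ⟨y, hy, hyg⟩, x, hx, hxg, hxq⟩

-- ===== VERDICT (by name: the statement is the Claim_ definition above) =====
theorem relation_terms_conflict_py_spec : Claim_equal_relation_terms_conflict_py := by
  intro q t _
  unfold Spec_relation_terms_conflict_py
  have := (a_iff q t).trans ((shapes q t).trans (b_iff q t).symm)
  cases ha : relation_terms_conflict_py q t <;>
    cases hb : relation_terms_conflict_py_alt q t <;> simp_all
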